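-- pv_equiv track=rewrite | github.com/aseempatni/author-profiling | src/PANdata/plot.py | distribute_age
-- ===== SOURCE A (Python) =====
-- def distribute_age(data):
--     age_1 = []
--     age_2 = []
--     age_3 = []
--     age_4 = []
--     for row in data:
--         if row[2]=='25-34':
--             age_1.append(row)
--         elif row[2]=='35-49':
--             age_2.append(row)
--         elif row[2]=='50-64':
--             age_3.append(row)
--         elif row[2]=='65-xx':
--             age_4.append(row)
--
--     return age_1,age_2,age_3,age_4
-- ===== SOURCE B (Python) =====
-- def distribute_age(data):
--     rows = list(data)
--     return ([r for r in rows if r[2] == '25-34'],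
--             [r for r in rows if r[2] == '35-49'],
--             [r for r in rows if r[2] == '50-64'],
--             [r for r in rows if r[2] == '65-xx'])
-- ===== Notes on version B (the rewrite author's own statement) =====
-- stated objective: idiomatic
-- what changed: Replaces the single interleaved append-loop with four independent filter comprehensions over the materialized rows, one per age bucket.
import Mathlib
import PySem

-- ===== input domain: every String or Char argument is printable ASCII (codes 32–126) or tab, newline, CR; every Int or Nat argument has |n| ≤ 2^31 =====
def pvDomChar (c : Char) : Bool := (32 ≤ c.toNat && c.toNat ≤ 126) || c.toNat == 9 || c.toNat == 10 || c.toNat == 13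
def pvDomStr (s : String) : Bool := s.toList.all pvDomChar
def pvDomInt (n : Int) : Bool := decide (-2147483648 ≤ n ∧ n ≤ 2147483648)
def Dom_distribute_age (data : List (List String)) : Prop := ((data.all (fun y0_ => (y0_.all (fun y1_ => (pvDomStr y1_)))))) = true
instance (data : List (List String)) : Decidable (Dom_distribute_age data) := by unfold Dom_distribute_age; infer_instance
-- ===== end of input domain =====

-- B replaces A's single interleaved append-loop by four independent filter passes (idiomatic; same O(n) cost).

-- ===== PORT A =====
-- one loop, appending each row to the bucket its row[2] selects
def distribute_age (data : List (List String)) : List (List String) × List (List String) × List (List String) × List (List String) :=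
  data.foldl
    (fun acc row =>
      let (a1, a2, a3, a4) := acc
      if PySem.List.pyGet? row 2 = some "25-34" then (a1 ++ [row], a2, a3, a4)
      else if PySem.List.pyGet? row 2 = some "35-49" then (a1, a2 ++ [row], a3, a4)
      else if PySem.List.pyGet? row 2 = some "50-64" then (a1, a2, a3 ++ [row], a4)
      else if PySem.List.pyGet? row 2 = some "65-xx" then (a1, a2, a3, a4 ++ [row])
      else (a1, a2, a3, a4))
    ([], [], [], [])

-- ===== PORT B =====
-- four independent filter passes, one per bucket
def distribute_age_alt (data : List (List String)) : List (List String) × List (List String) × List (List String) × List (List String) :=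
  (data.filter (fun r => PySem.List.pyGet? r 2 == some "25-34"),
   data.filter (fun r => PySem.List.pyGet? r 2 == some "35-49"),
   data.filter (fun r => PySem.List.pyGet? r 2 == some "50-64"),
   data.filter (fun r => PySem.List.pyGet? r 2 == some "65-xx"))

-- ===== PRECONDITION & SPEC =====
-- Pre_ excludes rows shorter than 3 elements: there row[2] raises IndexError in both A and B.
def Pre_distribute_age (data : List (List String)) : Prop :=
  ∀ row ∈ data, 3 ≤ row.length
instance (data : List (List String)) : Decidable (Pre_distribute_age data) := by unfold Pre_distribute_age; infer_instance

def pvWitness_distribute_age : List (List String) :=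
  [["a", "b", "25-34"], ["x", "y", "99-zz"], ["p", "q", "65-xx"]]

def Spec_distribute_age (data : List (List String)) (out : List (List String) × List (List String) × List (List String) × List (List String)) : Prop := out = distribute_age_alt data
instance (data : List (List String)) (out : List (List String) × List (List String) × List (List String) × List (List String)) : Decidable (Spec_distribute_age data out) := by unfold Spec_distribute_age; infer_instance

-- ===== CLAIM (what is proved, stated in full; the proofs are below) =====
def Claim_equal_distribute_age : Prop := ∀ (data : List (List String)), Dom_distribute_age data → Pre_distribute_age data → Spec_distribute_age data (distribute_age data)

-- ===== LEMMAS AND PROOFS =====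
-- loop invariant: A's fold from accumulators (a1,a2,a3,a4) appends exactly the four filters
theorem distribute_age_fold_eq (data : List (List String))
    (a1 a2 a3 a4 : List (List String)) :
    data.foldl
      (fun acc row =>
        let (b1, b2, b3, b4) := acc
        if PySem.List.pyGet? row 2 = some "25-34" then (b1 ++ [row], b2, b3, b4)
        else if PySem.List.pyGet? row 2 = some "35-49" then (b1, b2 ++ [row], b3, b4)
        else if PySem.List.pyGet? row 2 = some "50-64" then (b1, b2, b3 ++ [row], b4)
        else if PySem.List.pyGet? row 2 = some "65-xx" then (b1, b2, b3, b4 ++ [row])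
        else (b1, b2, b3, b4))
      (a1, a2, a3, a4)
    = (a1 ++ data.filter (fun r => PySem.List.pyGet? r 2 == some "25-34"),
       a2 ++ data.filter (fun r => PySem.List.pyGet? r 2 == some "35-49"),
       a3 ++ data.filter (fun r => PySem.List.pyGet? r 2 == some "50-64"),
       a4 ++ data.filter (fun r => PySem.List.pyGet? r 2 == some "65-xx")) := by
  induction data generalizing a1 a2 a3 a4 with
  | nil => simp
  | cons row rest ih =>
    simp only [List.foldl_cons, List.filter_cons]
    by_cases h1 : PySem.List.pyGet? row 2 = some "25-34" <;>
      by_cases h2 : PySem.List.pyGet? row 2 = some "35-49" <;>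
        by_cases h3 : PySem.List.pyGet? row 2 = some "50-64" <;>
          by_cases h4 : PySem.List.pyGet? row 2 = some "65-xx" <;>
            simp [h1, h2, h3, h4, ih]

-- ===== VERDICT (by name: the statement is the Claim_ definition above) =====
theorem distribute_age_spec : Claim_equal_distribute_age := by
  intro data _ _
  show distribute_age data = distribute_age_alt data
  unfold distribute_age distribute_age_alt
  simpa using distribute_age_fold_eq data [] [] [] []
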